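-- pv_equiv track=rewrite | github.com/cleeneuro/whisker_tasks_analysis | python_analysis/calcium_imaging/selectivity_histogram_singleanimal.py | get_animals_by_status
-- ===== SOURCE A (Python) =====
-- def get_animals_by_status(metadata, status_type='learner', status_values=None):
--     """
--     Get lists of animals based on their status.
--
--     Args:
--         metadata (dict): Animal metadata dictionary
--         status_type (str): Type of status to filter by ('learner', 'cheater', 'sex', etc.)
--         status_values (list): List of status values to include (e.g., ['learner', 'non-learner'])
--
--     Returns:
--         dict: Dictionary with status values as keys and lists of animal names as values
--     """
--     if status_values is None:
--         if status_type == 'learner':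
--             status_values = ['learner', 'non-learner']
--         elif status_type == 'cheater':
--             status_values = ['cheater', 'non-cheater']
--         elif status_type == 'intrinsic_imaging_result':
--             status_values = ['c1_c2', 'other']
--         else:
--             # Get all unique values for this status type
--             status_values = list(set(animal_data[status_type] for animal_data in metadata.values()))
--             status_values = [s for s in status_values if s != 'unknown']
--
--     animals_by_status = {status: [] for status in status_values}
--
--     for animal_name, animal_data in metadata.items():
--         animal_status = animal_data.get(status_type, 'unknown')
--
--         # Special handling for intrinsic imaging results
--         if status_type == 'intrinsic_imaging_result':
--             if animal_status == 'c1_c2':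
--                 animals_by_status['c1_c2'].append(animal_name)
--             elif animal_status != 'unknown':
--                 animals_by_status['other'].append(animal_name)
--         else:
--             # Standard handling for other status types
--             if animal_status in status_values:
--                 animals_by_status[animal_status].append(animal_name)
--
--     return animals_by_status
-- ===== SOURCE B (Python) =====
-- def get_animals_by_status(metadata, status_type='learner', status_values=None):
--     """Group animals by status in two staged passes: first tag every animal with its
--     effective group key, then assemble the result with one filtering scan of the
--     tagged list per status value — instead of a single classifying pass appending
--     into a pre-initialized dict."""
--     if status_values is None:
--         defaults = {
--             'learner': ['learner', 'non-learner'],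
--             'cheater': ['cheater', 'non-cheater'],
--             'intrinsic_imaging_result': ['c1_c2', 'other'],
--         }
--         if status_type in defaults:
--             status_values = defaults[status_type]
--         else:
--             seen = dict.fromkeys(d[status_type] for d in metadata.values())
--             status_values = [s for s in seen if s != 'unknown']
--
--     if status_type == 'intrinsic_imaging_result':
--         def key_of(s):
--             return 'c1_c2' if s == 'c1_c2' else (None if s == 'unknown' else 'other')
--     else:
--         allowed = set(status_values)
--         def key_of(s):
--             return s if s in allowed else None
--
--     keyed = [(key_of(data.get(status_type, 'unknown')), name)
--              for name, data in metadata.items()]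
--     return {v: [name for k, name in keyed if k == v] for v in status_values}
-- ===== Notes on version B (the rewrite author's own statement) =====
-- stated objective: alternative
-- what changed: A makes one classifying pass appending each animal into a pre-initialized dict through inline branches; B instead works in two staged passes — first tagging every animal with its effective group key, then assembling the result with one filtering scan of the tagged list per status value — so the output is built group by group rather than animal by animal.
-- crash fix: With status_type 'intrinsic_imaging_result' and an explicit status_values list missing 'c1_c2' or 'other' that some animal's status maps to, A raises KeyError on the missing group key; B returns the dict with only the requested status values (each unmatched one an empty list). — e.g. on get_animals_by_status([("a1", [("intrinsic_imaging_result", "c2_only")])], "intrinsic_imaging_result", some ["c1_c2"]): A raises KeyError, B returns [("c1_c2", [])]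
import Mathlib
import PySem

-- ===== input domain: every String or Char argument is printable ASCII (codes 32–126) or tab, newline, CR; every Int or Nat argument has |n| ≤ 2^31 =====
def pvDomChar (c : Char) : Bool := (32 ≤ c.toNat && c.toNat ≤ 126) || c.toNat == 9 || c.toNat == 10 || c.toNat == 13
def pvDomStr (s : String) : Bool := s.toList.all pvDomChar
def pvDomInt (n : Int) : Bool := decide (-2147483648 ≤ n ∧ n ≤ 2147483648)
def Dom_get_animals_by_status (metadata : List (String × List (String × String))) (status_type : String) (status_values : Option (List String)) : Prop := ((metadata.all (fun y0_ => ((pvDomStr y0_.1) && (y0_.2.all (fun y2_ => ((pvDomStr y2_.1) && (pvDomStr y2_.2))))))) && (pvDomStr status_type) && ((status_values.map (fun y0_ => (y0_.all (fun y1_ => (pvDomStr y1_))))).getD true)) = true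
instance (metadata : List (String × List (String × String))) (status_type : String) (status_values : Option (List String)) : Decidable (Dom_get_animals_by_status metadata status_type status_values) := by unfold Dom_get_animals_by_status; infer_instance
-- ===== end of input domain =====

-- B assembles the result group by group, one filtering scan of metadata per status value,
-- instead of A's single classifying pass into a pre-initialized dict.


-- ===== PORT A =====
-- Transliteration of A. Python raises KeyError at two places; Pre_ excludes exactly those
-- inputs, so the total stand-ins used here are never reached on admitted inputs:
--  * else-default branch: animal_data[status_type] raises when the key is missing → ported as getD "unknown";
--  * intrinsic branch: animals_by_status['c1_c2'/'other'].append raises when that key is absent → ported as modify.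
-- A's list(set(...)) is ported as PySem.Set.ofList (first-occurrence order); Python's set
-- iteration order only affects the returned dict's key order, which dict comparison ignores.
def get_animals_by_status (metadata : List (String × List (String × String))) (status_type : String) (status_values : Option (List String)) : List (String × List String) :=
  let md : PySem.Dict String (List (String × String)) := PySem.Dict.ofList metadata
  let sv : List String :=
    match status_values with
    | some vs => vs
    | none =>
      if status_type == "learner" then ["learner", "non-learner"]
      else if status_type == "cheater" then ["cheater", "non-cheater"]
      else if status_type == "intrinsic_imaging_result" then ["c1_c2", "other"]
      else ((PySem.Set.ofList (md.values.map (fun d => (PySem.Dict.ofList d).getD status_type "unknown"))).filter (fun s => s != "unknown"))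
  let init : PySem.Dict String (List String) := sv.foldl (fun d s => d.insert s []) PySem.Dict.empty
  let fin : PySem.Dict String (List String) := md.items.foldl (fun d p =>
      let s := (PySem.Dict.ofList p.2).getD status_type "unknown"
      if status_type == "intrinsic_imaging_result" then
        if s == "c1_c2" then d.modify "c1_c2" [] (fun l => l ++ [p.1])
        else if s != "unknown" then d.modify "other" [] (fun l => l ++ [p.1])
        else d
      else
        if sv.contains s then d.modify s [] (fun l => l ++ [p.1]) else d) init
  fin.items

-- ===== PORT B =====
-- Transliteration of Source B. The default branch's d[status_type] raises like A's → getD,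
-- excluded by Pre_; Python's dict.fromkeys-then-filter is PySem.List.dedup + filter;
-- 'k == v' compares an Optional key with a string → 'q.1 == some v'.
def get_animals_by_status_alt (metadata : List (String × List (String × String))) (status_type : String) (status_values : Option (List String)) : List (String × List String) :=
  let md : PySem.Dict String (List (String × String)) := PySem.Dict.ofList metadata
  let defaults : PySem.Dict String (List String) :=
    PySem.Dict.ofList [("learner", ["learner", "non-learner"]), ("cheater", ["cheater", "non-cheater"]), ("intrinsic_imaging_result", ["c1_c2", "other"])]
  let sv : List String :=
    match status_values with
    | some vs => vs
    | none =>
      match defaults.get? status_type with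
      | some vs => vs
      | none => (PySem.List.dedup (md.values.map (fun d => (PySem.Dict.ofList d).getD status_type "unknown"))).filter (fun s => s != "unknown")
  let keyOf : String → Option String :=
    if status_type == "intrinsic_imaging_result" then
      fun s => if s == "c1_c2" then some "c1_c2" else if s == "unknown" then none else some "other"
    else
      let allowed : PySem.Set String := PySem.Set.ofList sv
      fun s => if allowed.contains s then some s else none
  let keyed : List (Option String × String) :=
    md.items.map (fun p => (keyOf ((PySem.Dict.ofList p.2).getD status_type "unknown"), p.1))
  (sv.foldl (fun r v => r.insert v ((keyed.filter (fun q => q.1 == some v)).map (fun q => q.2)))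
    PySem.Dict.empty).items

-- ===== PRECONDITION & SPEC =====
-- True iff some animal record lacks the status_type key (A's default branch raises KeyError there).
def pvMissingKeyB (metadata : List (String × List (String × String))) (status_type : String) : Bool :=
  (PySem.Dict.ofList metadata).values.any (fun d => !(PySem.Dict.ofList d).contains status_type)

-- True iff the intrinsic branch would append under a group key absent from the explicit status_values.
def pvIntrinsicGapB (metadata : List (String × List (String × String))) (status_type : String) (status_values : Option (List String)) : Bool :=
  status_type == "intrinsic_imaging_result" &&
  (match status_values with
   | none => false
   | some vs => (PySem.Dict.ofList metadata).items.any (fun p =>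
       let s := (PySem.Dict.ofList p.2).getD status_type "unknown"
       (s == "c1_c2" && !vs.contains "c1_c2") ||
       (s != "c1_c2" && s != "unknown" && !vs.contains "other")))

-- Pre_ excludes exactly the inputs where A raises KeyError: (a) the default status_values
-- branch with an animal record lacking the status_type key, and (b) the intrinsic branch
-- appending under a group key missing from an explicit status_values list.
def Pre_get_animals_by_status (metadata : List (String × List (String × String))) (status_type : String) (status_values : Option (List String)) : Prop :=
  ¬ (status_values = none ∧ status_type ∉ (["learner", "cheater", "intrinsic_imaging_result"] : List String) ∧ pvMissingKeyB metadata status_type = true)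
  ∧ pvIntrinsicGapB metadata status_type status_values = false
instance (metadata : List (String × List (String × String))) (status_type : String) (status_values : Option (List String)) : Decidable (Pre_get_animals_by_status metadata status_type status_values) := by unfold Pre_get_animals_by_status; infer_instance

def pvWitness_get_animals_by_status : (List (String × List (String × String))) × String × Option (List String) :=
  ([("a1", [("learner", "learner")]), ("a2", [("learner", "non-learner")])], "learner", none)

-- On these inputs A raises KeyError (a group key missing from the explicit status_values);
-- B returns the dict keyed by the requested status values, unmatched ones empty.
def Raises_get_animals_by_status (metadata : List (String × List (String × String))) (status_type : String) (status_values : Option (List String)) : Prop :=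
  pvIntrinsicGapB metadata status_type status_values = true
instance (metadata : List (String × List (String × String))) (status_type : String) (status_values : Option (List String)) : Decidable (Raises_get_animals_by_status metadata status_type status_values) := by unfold Raises_get_animals_by_status; infer_instance

def pvRaiseWitness_get_animals_by_status : (List (String × List (String × String))) × String × Option (List String) :=
  ([("a1", [("intrinsic_imaging_result", "c2_only")])], "intrinsic_imaging_result", some ["c1_c2"])
def pvRaiseWitnessOut_get_animals_by_status : List (String × List String) := [("c1_c2", [])]

def Spec_get_animals_by_status (metadata : List (String × List (String × String))) (status_type : String) (status_values : Option (List String)) (out : List (String × List String)) : Prop := out = get_animals_by_status_alt metadata status_type status_values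
instance (metadata : List (String × List (String × String))) (status_type : String) (status_values : Option (List String)) (out : List (String × List String)) : Decidable (Spec_get_animals_by_status metadata status_type status_values out) := by unfold Spec_get_animals_by_status; infer_instance

-- ===== CLAIM (what is proved, stated in full; the proofs are below) =====
def Claim_equal_get_animals_by_status : Prop := ∀ (metadata : List (String × List (String × String))) (status_type : String) (status_values : Option (List String)), Dom_get_animals_by_status metadata status_type status_values → Pre_get_animals_by_status metadata status_type status_values → Spec_get_animals_by_status metadata status_type status_values (get_animals_by_status metadata status_type status_values)
def Claim_raises_get_animals_by_status : Prop := (∀ (metadata : List (String × List (String × String))) (status_type : String) (status_values : Option (List String)), Dom_get_animals_by_status metadata status_type status_values → Raises_get_animals_by_status metadata status_type status_values → ¬ Pre_get_animals_by_status metadata status_type status_values) ∧ (Dom_get_animals_by_status (pvRaiseWitness_get_animals_by_status.1) (pvRaiseWitness_get_animals_by_status.2.1) (pvRaiseWitness_get_animals_by_status.2.2) ∧ Raises_get_animals_by_status (pvRaiseWitness_get_animals_by_status.1) (pvRaiseWitness_get_animals_by_status.2.1) (pvRaiseWitness_get_animals_by_status.2.2) ∧ get_animals_by_status_alt (pvRaiseWitness_get_animals_by_status.1)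 (pvRaiseWitness_get_animals_by_status.2.1) (pvRaiseWitness_get_animals_by_status.2.2) = pvRaiseWitnessOut_get_animals_by_status)

-- ===== LEMMAS AND PROOFS =====

-- The effective group key of a status string (shared characterization of both programs).
def pvKeyF (status_type : String) (sv : List String) (s : String) : Option String :=
  if status_type == "intrinsic_imaging_result" then
    (if s == "c1_c2" then some "c1_c2" else if s == "unknown" then none else some "other")
  else (if sv.contains s then some s else none)

def pvStatOf (status_type : String) (p : String × List (String × String)) : String :=
  (PySem.Dict.ofList p.2).getD status_type "unknown"

-- Names of the animals in L whose effective key is v, in order.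
def pvCollect (status_type : String) (sv : List String) (L : List (String × List (String × String))) (v : String) : List String :=
  (L.filter (fun p => pvKeyF status_type sv (pvStatOf status_type p) == some v)).map (·.1)

-- A's resolution of status_values (B's is proved equal to it below).
def pvResolve (metadata : List (String × List (String × String))) (status_type : String) (status_values : Option (List String)) : List String :=
  match status_values with
  | some vs => vs
  | none =>
    if status_type == "learner" then ["learner", "non-learner"]
    else if status_type == "cheater" then ["cheater", "non-cheater"]
    else if status_type == "intrinsic_imaging_result" then ["c1_c2", "other"]
    else ((PySem.Set.ofList ((PySem.Dict.ofList metadata).values.map (fun d => (PySem.Dict.ofList d).getD status_type "unknown"))).filter (fun s => s != "unknown"))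

-- The grouping step A's loop implements.
def pvStep (status_type : String) (sv : List String) (g : PySem.Dict String (List String)) (p : String × List (String × String)) : PySem.Dict String (List String) :=
  match pvKeyF status_type sv (pvStatOf status_type p) with
  | some k => g.modify k [] (fun l => l ++ [p.1])
  | none => g

-- {v: g(v) for v in sv} has items (Set.ofList sv).map (fun v => (v, g v)).
theorem pv_buildTable_items (sv : List String) (g : String → List String) :
    (sv.foldl (fun d v => d.insert v (g v)) PySem.Dict.empty).items
      = (PySem.Set.ofList sv).map (fun v => (v, g v)) := by
  induction sv using List.reverseRecOn with
  | nil => rfl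
  | append_singleton xs x ih =>
    rw [List.foldl_append, List.foldl_cons, List.foldl_nil, PySem.Set.ofList_append_singleton]
    set d := xs.foldl (fun d v => d.insert v (g v)) PySem.Dict.empty with hd
    have hkeys' : d.keys = PySem.Set.ofList xs := by
      show d.items.map (·.1) = _
      rw [ih, List.map_map]
      exact List.map_id'' (fun _ => rfl) _
    by_cases hx : x ∈ PySem.Set.ofList xs
    · have hc : d.contains x = true := by
        rw [PySem.Dict.contains_iff_mem_keys, hkeys']; exact hx
      rw [PySem.Dict.items_insert_of_contains d (g x) hc, ih, PySem.Set.add_of_mem hx]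
      rw [List.map_map]
      apply List.map_congr_left
      intro v hv
      by_cases hvx : v = x
      · subst hvx; simp
      · simp [hvx]
    · have hc : d.contains x = false := by
        rw [← Bool.not_eq_true, PySem.Dict.contains_iff_mem_keys, hkeys']; exact hx
      rw [PySem.Dict.items_insert_of_not_contains d (g x) hc, ih, PySem.Set.add_of_not_mem hx]
      simp

-- getD of A's grouping fold appends exactly the collected names.
theorem pv_group_getD (st : String) (sv : List String) (L : List (String × List (String × String)))
    (d : PySem.Dict String (List String)) (v : String) :
    (L.foldl (pvStep st sv) d).getD v [] = d.getD v [] ++ pvCollect st sv L v := by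
  induction L generalizing d with
  | nil => simp [pvCollect]
  | cons p L ih =>
    rw [List.foldl_cons]
    cases hk : pvKeyF st sv (pvStatOf st p) with
    | none =>
      rw [show pvStep st sv d p = d from by simp [pvStep, hk]]
      rw [ih]
      simp [pvCollect, hk]
    | some k =>
      rw [show pvStep st sv d p = d.modify k [] (fun l => l ++ [p.1]) from by simp [pvStep, hk]]
      rw [ih, PySem.Dict.getD_modify]
      by_cases hv : v = k
      · subst hv
        simp [pvCollect, hk, List.append_assoc]
      · simp [pvCollect, hk, hv, Ne.symm hv]

-- keys of A's grouping fold are unchanged when every produced key is already present.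
theorem pv_group_keys (st : String) (sv : List String) (L : List (String × List (String × String)))
    (d : PySem.Dict String (List String))
    (h : ∀ p ∈ L, ∀ k, pvKeyF st sv (pvStatOf st p) = some k → d.contains k = true) :
    (L.foldl (pvStep st sv) d).keys = d.keys := by
  induction L generalizing d with
  | nil => rfl
  | cons p L ih =>
    rw [List.foldl_cons]
    cases hk : pvKeyF st sv (pvStatOf st p) with
    | none =>
      rw [show pvStep st sv d p = d from by simp [pvStep, hk]]
      exact ih d (fun q hq k hk' => h q (List.mem_cons_of_mem _ hq) k hk')
    | some k =>
      rw [show pvStep st sv d p = d.modify k [] (fun l => l ++ [p.1]) from by simp [pvStep, hk]]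
      have hc : d.contains k = true := h p List.mem_cons_self k hk
      have hkeys : (d.modify k [] (fun l => l ++ [p.1])).keys = d.keys := by
        rw [PySem.Dict.keys_modify, PySem.Dict.keys_insert_of_contains _ _ hc]
      rw [ih _ (fun q hq k' hk' => by
        rw [PySem.Dict.contains_iff_mem_keys, hkeys, ← PySem.Dict.contains_iff_mem_keys]
        exact h q (List.mem_cons_of_mem _ hq) k' hk'), hkeys]

-- A's body, with status_values resolved to sv, equals the canonical fold.
theorem pv_bodyA_eq (metadata : List (String × List (String × String))) (st : String) (sv : List String) :
    ((PySem.Dict.ofList metadata).items.foldl (fun d p =>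
        let s := (PySem.Dict.ofList p.2).getD st "unknown"
        if st == "intrinsic_imaging_result" then
          if s == "c1_c2" then d.modify "c1_c2" [] (fun l => l ++ [p.1])
          else if s != "unknown" then d.modify "other" [] (fun l => l ++ [p.1])
          else d
        else
          if sv.contains s then d.modify s [] (fun l => l ++ [p.1]) else d)
      (sv.foldl (fun d s => d.insert s []) PySem.Dict.empty))
    = (PySem.Dict.ofList metadata).items.foldl (pvStep st sv)
        (sv.foldl (fun d s => d.insert s []) PySem.Dict.empty) := by
  congr 1
  funext d p
  simp only [pvStep, pvKeyF, pvStatOf]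
  by_cases hi : (st == "intrinsic_imaging_result") = true
  · simp only [hi, if_true]
    by_cases hc : ((PySem.Dict.ofList p.2).getD st "unknown" == "c1_c2") = true
    · simp [hc]
    · by_cases hu : ((PySem.Dict.ofList p.2).getD st "unknown" == "unknown") = true
      · simp only [hc]
        simp only [Bool.false_eq_true, if_false]
        rw [if_pos hu]
        simp [show (PySem.Dict.ofList p.2).getD st "unknown" = "unknown" from by simpa using hu]
      · simp only [hc]
        simp only [Bool.false_eq_true, if_false]
        rw [if_neg hu]
        simp [show ¬ (PySem.Dict.ofList p.2).getD st "unknown" = "unknown" from by simpa using hu]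
  · simp only [hi, if_false, Bool.false_eq_true]
    by_cases hm : (PySem.Dict.ofList p.2).getD st "unknown" ∈ sv <;> simp [hm]

-- A's assembled result: (Set.ofList sv).map (v ↦ (v, collected names)), provided every
-- produced key lies in sv (the Pre_ condition).
theorem pv_A_items (metadata : List (String × List (String × String))) (st : String) (sv : List String)
    (h : ∀ p ∈ (PySem.Dict.ofList metadata).items, ∀ k,
        pvKeyF st sv (pvStatOf st p) = some k → k ∈ sv) :
    ((PySem.Dict.ofList metadata).items.foldl (pvStep st sv)
        (sv.foldl (fun d s => d.insert s []) PySem.Dict.empty)).items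
    = (PySem.Set.ofList sv).map
        (fun v => (v, pvCollect st sv (PySem.Dict.ofList metadata).items v)) := by
  set L := (PySem.Dict.ofList metadata).items with hL
  set init := sv.foldl (fun d s => d.insert s []) PySem.Dict.empty with hinit
  have hinitItems : init.items = (PySem.Set.ofList sv).map (fun v => (v, ([] : List String))) :=
    pv_buildTable_items sv (fun _ => [])
  have hinitKeys : init.keys = PySem.Set.ofList sv := by
    show init.items.map (·.1) = _
    rw [hinitItems, List.map_map]
    exact List.map_id'' (fun _ => rfl) _
  have hinitNodup : init.keys.Nodup := by rw [hinitKeys]; exact PySem.Set.nodup_ofList sv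
  have hcont : ∀ p ∈ L, ∀ k, pvKeyF st sv (pvStatOf st p) = some k → init.contains k = true := by
    intro p hp k hk
    rw [PySem.Dict.contains_iff_mem_keys, hinitKeys, PySem.Set.mem_ofList]
    exact h p hp k hk
  have hfinKeys : (L.foldl (pvStep st sv) init).keys = PySem.Set.ofList sv := by
    rw [pv_group_keys st sv L init hcont, hinitKeys]
  have hfinNodup : (L.foldl (pvStep st sv) init).keys.Nodup := by
    rw [hfinKeys]; exact PySem.Set.nodup_ofList sv
  rw [PySem.Dict.items_eq_map_keys _ hfinNodup [], hfinKeys]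
  apply List.map_congr_left
  intro v hv
  have hinitgetD : init.getD v [] = [] := by
    refine PySem.Dict.getD_of_mem_items init ?_ hinitNodup []
    rw [hinitItems]
    exact List.mem_map_of_mem hv
  rw [pv_group_getD, hinitgetD, List.nil_append]

-- B's per-value scan of the tagged list is pvCollect (its key_of is pvKeyF).
theorem pv_bodyB_eq (metadata : List (String × List (String × String))) (st : String) (sv : List String) :
    (sv.foldl (fun r v => r.insert v
        ((((PySem.Dict.ofList metadata).items.map (fun p =>
            ((if st == "intrinsic_imaging_result" then
                fun s => if s == "c1_c2" then some "c1_c2" else if s == "unknown" then none else some "other"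
              else
                fun s => if (PySem.Set.ofList sv).contains s then some s else none)
             ((PySem.Dict.ofList p.2).getD st "unknown"), p.1))).filter (fun q => q.1 == some v)).map (fun q => q.2)))
      PySem.Dict.empty)
    = sv.foldl (fun r v => r.insert v (pvCollect st sv (PySem.Dict.ofList metadata).items v)) PySem.Dict.empty := by
  have hfun : (if st == "intrinsic_imaging_result" then
                 fun s => if s == "c1_c2" then some "c1_c2" else if s == "unknown" then none else some "other"
               else
                 fun s => if (PySem.Set.ofList sv).contains s then some s else none)
             = pvKeyF st sv := by
    by_cases hi : (st == "intrinsic_imaging_result") = true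
    · funext s; simp [pvKeyF, hi]
    · funext s; simp [pvKeyF, hi]
  rw [hfun]
  congr 1
  funext r v
  rw [List.filter_map, List.map_map]
  rfl

-- B's resolution of status_values equals A's.
theorem pv_resolveB_eq (metadata : List (String × List (String × String))) (st : String) (svo : Option (List String)) :
    (match svo with
     | some vs => vs
     | none =>
       match (PySem.Dict.ofList [("learner", ["learner", "non-learner"]), ("cheater", ["cheater", "non-cheater"]), ("intrinsic_imaging_result", ["c1_c2", "other"])] : PySem.Dict String (List String)).get? st with
       | some vs => vs
       | none => (PySem.List.dedup ((PySem.Dict.ofList metadata).values.map (fun d => (PySem.Dict.ofList d).getD st "unknown"))).filter (fun s => s != "unknown"))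
    = pvResolve metadata st svo := by
  unfold pvResolve
  cases svo with
  | some vs => rfl
  | none =>
    by_cases h1 : st = "learner"
    · subst h1; rfl
    · by_cases h2 : st = "cheater"
      · subst h2; rfl
      · by_cases h3 : st = "intrinsic_imaging_result"
        · subst h3; rfl
        · have e1 : ("learner" == st) = false := by simp [Ne.symm h1]
          have e2 : ("cheater" == st) = false := by simp [Ne.symm h2]
          have e3 : ("intrinsic_imaging_result" == st) = false := by simp [Ne.symm h3]
          have hdict : (PySem.Dict.ofList [("learner", ["learner", "non-learner"]), ("cheater", ["cheater", "non-cheater"]), ("intrinsic_imaging_result", ["c1_c2", "other"])] : PySem.Dict String (List String)) = PySem.Dict.mk [("learner", ["learner", "non-learner"]), ("cheater", ["cheater", "non-cheater"]), ("intrinsic_imaging_result", ["c1_c2", "other"])] := rfl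
          rw [hdict]
          simp only [PySem.Dict.get?_mk_cons, e1, e2, e3, Bool.false_eq_true, if_false]
          simp [h1, h2, h3, PySem.List.dedup_eq_ofList]
          rfl

-- Every key the effective-key function produces lies in the resolved status_values list.
theorem pv_keys_in_sv (metadata : List (String × List (String × String))) (st : String) (svo : Option (List String))
    (hpre : Pre_get_animals_by_status metadata st svo) :
    ∀ p ∈ (PySem.Dict.ofList metadata).items, ∀ k,
      pvKeyF st (pvResolve metadata st svo) (pvStatOf st p) = some k → k ∈ pvResolve metadata st svo := by
  intro p hp k hk
  unfold pvKeyF at hk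
  by_cases hi : (st == "intrinsic_imaging_result") = true
  · rw [if_pos hi] at hk
    have hst : st = "intrinsic_imaging_result" := by simpa using hi
    cases svo with
    | none =>
      have hres : pvResolve metadata st none = ["c1_c2", "other"] := by
        unfold pvResolve; subst hst; rfl
      rw [hres]
      by_cases hc : (pvStatOf st p == "c1_c2") = true
      · rw [if_pos hc] at hk; simp at hk; subst hk; simp
      · rw [if_neg (by simp_all)] at hk
        by_cases hu : (pvStatOf st p == "unknown") = true
        · rw [if_pos hu] at hk; cases hk
        · rw [if_neg (by simp_all)] at hk; simp at hk; subst hk; simp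
    | some vs =>
      have hres : pvResolve metadata st (some vs) = vs := rfl
      rw [hres]
      have hgap := hpre.2
      unfold pvIntrinsicGapB at hgap
      rw [hst] at hgap
      simp only [BEq.rfl, Bool.true_and, List.any_eq_false] at hgap
      have hgp := hgap p hp
      rw [← hst] at hgp
      by_cases hc : (pvStatOf st p == "c1_c2") = true
      · rw [if_pos hc] at hk
        simp at hk; subst hk
        have hc' : pvStatOf st p = "c1_c2" := by simpa using hc
        simp only [pvStatOf] at hc'
        simp [hc'] at hgp
        simpa using hgp
      · rw [if_neg (by simp_all)] at hk
        by_cases hu : (pvStatOf st p == "unknown") = true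
        · rw [if_pos hu] at hk; cases hk
        · rw [if_neg (by simp_all)] at hk
          simp at hk; subst hk
          have hc' : ¬ pvStatOf st p = "c1_c2" := by simpa using hc
          have hu' : ¬ pvStatOf st p = "unknown" := by simpa using hu
          simp only [pvStatOf] at hc' hu'
          simp [hc', hu'] at hgp
          simpa using hgp
  · rw [if_neg hi] at hk
    by_cases hm : (pvResolve metadata st svo).contains (pvStatOf st p) = true
    · rw [if_pos hm] at hk
      simp at hk; subst hk
      simpa using hm
    · rw [if_neg hm] at hk; cases hk

-- ===== VERDICT (by name: the statement is the Claim_ definition above) =====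
theorem get_animals_by_status_spec : Claim_equal_get_animals_by_status := by
  intro m st svo hdom hpre
  unfold Spec_get_animals_by_status
  have ha : get_animals_by_status m st svo
      = (PySem.Set.ofList (pvResolve m st svo)).map
          (fun v => (v, pvCollect st (pvResolve m st svo) (PySem.Dict.ofList m).items v)) := by
    unfold get_animals_by_status
    rw [← pv_A_items m st (pvResolve m st svo) (pv_keys_in_sv m st svo hpre),
        ← pv_bodyA_eq m st (pvResolve m st svo)]
    rfl
  have hb : get_animals_by_status_alt m st svo
      = (PySem.Set.ofList (pvResolve m st svo)).map
          (fun v => (v, pvCollect st (pvResolve m st svo) (PySem.Dict.ofList m).items v)) := by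
    unfold get_animals_by_status_alt
    rw [← pv_buildTable_items (pvResolve m st svo)
          (fun v => pvCollect st (pvResolve m st svo) (PySem.Dict.ofList m).items v),
        ← pv_bodyB_eq m st (pvResolve m st svo), ← pv_resolveB_eq m st svo]
  rw [ha, hb]

@[simp] theorem get_animals_by_status_raises : Claim_raises_get_animals_by_status := by
  unfold Claim_raises_get_animals_by_status
  exact ⟨by intro m st sv _ hr hp; exact absurd hp.2 (by simp [Raises_get_animals_by_status] at hr; simp [hr]), by decide⟩
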